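-- pv_equiv track=rewrite | github.com/jhoon9494/problemSolving | baekjoon/3687.py | maxStickCounter
-- ===== SOURCE A (Python) =====
-- def maxStickCounter(number):
--   # 그리디
--   # 자릿수가 많으면 최대값이므로 2를 최대한 넣어준다.
--   maxNumber = ""
--   maxCnt = number // 2
--   while(True):
--     rest = number - (2 * maxCnt)
--
--     # 성냥이 1개 남았다면 만들 수 있는 숫자가 없으므로 count를 1빼줌
--     if rest == 1:
--       maxCnt -= 1
--
--     else:
--       # 성냥이 3개 남았다면 우선 3을 먼저 삽입
--       if rest == 3:
--         maxNumber += str(matchstick[3][-1])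
--       for _ in range(maxCnt):
--         maxNumber += str(matchstick[2][-1])
--       break
--   return maxNumber
--
-- matchstick = [0, 0, [1], [7], [4], [2, 3, 5], [0, 6, 9], [8]]
-- ===== SOURCE B (Python) =====
-- def maxStickCounter(number):
--     # Repeated subtraction: peel off 2 sticks (one trailing '1') at a time until a
--     # small base case remains, then resolve the base case by a 4-way table.
--     n = number
--     tail = []
--     while n >= 4:
--         tail.append('1')
--         n -= 2
--     if n % 2 != 0:
--         head = '7'
--     elif n == 2:
--         head = '1'
--     else:
--         head = ''
--     return head + ''.join(tail)
-- ===== Notes on version B (the rewrite author's own statement) =====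
-- stated objective: alternative
-- what changed: Replaces A's division-based greedy (maxCnt = number//2, while-True with decrement/recompute of rest, per-character string appends from the matchstick table) by repeated subtraction down to a small base case resolved by a branch table, collecting tail digits in a list joined once at the end.
import Mathlib
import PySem

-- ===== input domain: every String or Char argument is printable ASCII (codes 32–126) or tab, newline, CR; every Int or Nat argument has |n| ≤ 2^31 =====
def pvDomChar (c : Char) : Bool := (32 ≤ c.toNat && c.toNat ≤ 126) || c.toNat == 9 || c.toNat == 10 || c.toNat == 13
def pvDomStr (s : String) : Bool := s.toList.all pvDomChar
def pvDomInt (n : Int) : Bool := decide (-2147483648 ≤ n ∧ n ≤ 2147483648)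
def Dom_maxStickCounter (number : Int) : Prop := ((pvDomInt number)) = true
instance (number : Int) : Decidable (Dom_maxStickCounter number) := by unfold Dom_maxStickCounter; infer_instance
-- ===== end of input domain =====

-- B replaces A's division-based greedy by repeated subtraction down to a base case, joining collected digits once (objective: alternative).

-- ===== PORT A =====
-- matchstick[3][-1] = 7 and matchstick[2][-1] = 1: constant lookups into the literal
-- heterogeneous table, folded in as the integers 7 and 1 (exact).
-- The while(True) loop: each iteration recomputes rest; if rest = 1 it decrements maxCnt
-- and loops, otherwise it finishes. After one decrement rest becomes 3 ≠ 1, hence the measure.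
def pvLoopA (number maxCnt : Int) (maxNumber : String) : String :=
  let rest := number - 2 * maxCnt
  if rest = 1 then
    pvLoopA number (maxCnt - 1) maxNumber
  else
    let maxNumber := if rest = 3 then maxNumber ++ PySem.Int.toStr 7 else maxNumber
    (PySem.List.pyRange 0 maxCnt 1).foldl (fun s _ => s ++ PySem.Int.toStr 1) maxNumber
termination_by (if number - 2 * maxCnt = 1 then 1 else 0 : Nat)
decreasing_by
  rename_i h
  have h1 : number - 2 * maxCnt = 1 := h
  have h3 : number - 2 * (maxCnt - 1) ≠ 1 := by omega
  simp [h1, h3]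

def maxStickCounter (number : Int) : String :=
  pvLoopA number (PySem.Int.floordiv number 2) ""

-- ===== PORT B =====
-- while n >= 4: tail.append('1'); n -= 2 — the loop carries (n, tail); tail holds
-- single characters, so ''.join(tail) is String.ofList (exact).
def pvLoopB (n : Int) (tail : List Char) : Int × List Char :=
  if 4 ≤ n then pvLoopB (n - 2) (tail ++ ['1']) else (n, tail)
termination_by n.toNat
decreasing_by omega

def maxStickCounter_alt (number : Int) : String :=
  let (n, tail) := pvLoopB number []
  let head := if PySem.Int.mod n 2 ≠ 0 then "7" else if n = 2 then "1" else ""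
  head ++ String.ofList tail

-- ===== PRECONDITION & SPEC =====
def Spec_maxStickCounter (number : Int) (out : String) : Prop := out = maxStickCounter_alt number
instance (number : Int) (out : String) : Decidable (Spec_maxStickCounter number out) := by unfold Spec_maxStickCounter; infer_instance

-- ===== CLAIM (what is proved, stated in full; the proofs are below) =====
def Claim_equal_maxStickCounter : Prop := ∀ (number : Int), Dom_maxStickCounter number → Spec_maxStickCounter number (maxStickCounter number)

-- ===== LEMMAS AND PROOFS =====

-- Closed form both ports are reduced to: q = n // 2, even → '1'*q, odd → '7' + '1'*(q-1).
def pvClosed (number : Int) : String :=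
  let q := PySem.Int.floordiv number 2
  if PySem.Int.mod number 2 = 0 then
    String.ofList (PySem.List.pyRepeat ['1'] q)
  else
    "7" ++ String.ofList (PySem.List.pyRepeat ['1'] (q - 1))

theorem pv_fold_ones (l : List Int) (init : String) :
    l.foldl (fun s _ => s ++ PySem.Int.toStr 1) init
      = init ++ String.ofList (List.replicate l.length '1') := by
  induction l generalizing init with
  | nil => apply String.ext; simp
  | cons a t ih =>
      have h1 : PySem.Int.toChars 1 = ['1'] := by decide
      simp only [List.foldl, List.length_cons, ih]
      apply String.ext
      simp [List.replicate_succ, PySem.Int.toStr, h1]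

theorem maxStickCounter_eval (number : Int) :
    maxStickCounter number = pvClosed number := by
  have hq := PySem.Int.floordiv_mul_add_mod number 2
  have h0 : 0 ≤ PySem.Int.mod number 2 := PySem.Int.mod_nonneg number (by norm_num)
  have h2 : PySem.Int.mod number 2 < 2 := PySem.Int.mod_lt number (by norm_num)
  set q := PySem.Int.floordiv number 2 with hqdef
  set m := PySem.Int.mod number 2 with hmdef
  unfold maxStickCounter pvClosed
  rw [pvLoopA.eq_def]
  by_cases hm : m = 0
  · -- even: rest = 0
    have hr : number - 2 * q = 0 := by omega
    simp only [hr, ← hqdef, ← hmdef, hm]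
    norm_num
    rw [pv_fold_ones]
    simp [PySem.List.length_pyRange_one]
  · -- odd: rest = 1, one decrement, then rest = 3
    have hm1 : m = 1 := by omega
    have hr : number - 2 * q = 1 := by omega
    simp only [hr, ← hqdef, ← hmdef, hm1]
    rw [pvLoopA.eq_def]
    have hr3 : number - 2 * (q - 1) = 3 := by omega
    simp only [hr3]
    norm_num
    rw [pv_fold_ones]
    apply String.ext
    have h7 : PySem.Int.toChars 7 = ['7'] := by decide
    simp [PySem.List.length_pyRange_one,
      PySem.Int.toStr, h7]

-- The subtraction loop lands on n itself (n < 4) or on 2/3 by parity, having emitted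
-- (n//2 - 1) ones.
theorem pvLoopB_spec (n : Int) (tail : List Char) :
    pvLoopB n tail =
      (if n < 4 then n else if PySem.Int.mod n 2 = 0 then 2 else 3,
       tail ++ List.replicate (if n < 4 then 0 else (PySem.Int.floordiv n 2 - 1).toNat) '1') := by
  induction n, tail using pvLoopB.induct with
  | case2 n tail h =>
      rw [pvLoopB]
      have h4 : n < 4 := by omega
      simp [h, h4]
  | case1 n tail h ih =>
      rw [pvLoopB, if_pos h, ih]
      have hq := PySem.Int.floordiv_mul_add_mod n 2
      have h0 : 0 ≤ PySem.Int.mod n 2 := PySem.Int.mod_nonneg n (by norm_num)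
      have h2 : PySem.Int.mod n 2 < 2 := PySem.Int.mod_lt n (by norm_num)
      have hq' := PySem.Int.floordiv_mul_add_mod (n - 2) 2
      have h0' : 0 ≤ PySem.Int.mod (n - 2) 2 := PySem.Int.mod_nonneg (n - 2) (by norm_num)
      have h2' : PySem.Int.mod (n - 2) 2 < 2 := PySem.Int.mod_lt (n - 2) (by norm_num)
      have hm : PySem.Int.mod (n - 2) 2 = PySem.Int.mod n 2 := by omega
      have hd : PySem.Int.floordiv (n - 2) 2 = PySem.Int.floordiv n 2 - 1 := by omega
      have hn4 : ¬ n < 4 := by omega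
      by_cases h6 : n < 6
      · -- n = 4 or 5: the recursive call is in its base case
        have hb : n - 2 < 4 := by omega
        have hval : (if n - 2 < 4 then n - 2
            else if PySem.Int.mod (n - 2) 2 = 0 then 2 else 3) = n - 2 := by simp [hb]
        by_cases hm0 : PySem.Int.mod n 2 = 0
        · have : n = 4 := by omega
          subst this
          simp
        · have : n = 5 := by omega
          subst this
          simp
      · have hb : ¬ n - 2 < 4 := by omega
        have hcnt : (PySem.Int.floordiv (n - 2) 2 - 1).toNat + 1
            = (PySem.Int.floordiv n 2 - 1).toNat := by omega
        rw [if_neg hb, if_neg hb, if_neg hn4, if_neg hn4, hm, hd, ← hcnt,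
          List.replicate_succ, List.append_assoc]
        simp
        omega

theorem maxStickCounter_alt_eval (number : Int) :
    maxStickCounter_alt number = pvClosed number := by
  have hq := PySem.Int.floordiv_mul_add_mod number 2
  have h0 : 0 ≤ PySem.Int.mod number 2 := PySem.Int.mod_nonneg number (by norm_num)
  have h2 : PySem.Int.mod number 2 < 2 := PySem.Int.mod_lt number (by norm_num)
  unfold maxStickCounter_alt pvClosed
  rw [pvLoopB_spec]
  simp only [List.nil_append, PySem.List.pyRepeat_singleton]
  by_cases h4 : number < 4
  · rw [if_pos h4, if_pos h4]
    by_cases hm0 : PySem.Int.mod number 2 = 0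
    · rw [if_pos hm0]
      simp only [hm0, ne_eq, not_true_eq_false, if_false]
      by_cases he2 : number = 2
      · subst he2; decide
      · rw [if_neg he2]
        simp
        omega
    · rw [if_neg hm0]
      simp only [hm0, ne_eq, not_false_eq_true, if_true]
      have hz : (number / 2).toNat - 1 = 0 := by omega
      simp [hz]
  · rw [if_neg h4, if_neg h4]
    by_cases hm0 : PySem.Int.mod number 2 = 0
    · rw [if_pos hm0, if_pos hm0]
      have hmod22 : PySem.Int.mod 2 2 = 0 := by decide
      simp only [hmod22, ne_eq, not_true_eq_false, if_false]
      have hc : (PySem.Int.floordiv number 2).toNat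
          = (PySem.Int.floordiv number 2 - 1).toNat + 1 := by omega
      rw [hc, List.replicate_succ]
      apply String.ext; simp
    · rw [if_neg hm0, if_neg hm0]
      simp

-- ===== VERDICT (by name: the statement is the Claim_ definition above) =====
theorem maxStickCounter_spec : Claim_equal_maxStickCounter := by
  intro n _
  unfold Spec_maxStickCounter
  rw [maxStickCounter_eval, maxStickCounter_alt_eval]
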